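-- pv_equiv track=rewrite | github.com/societe-generale/aikit | aikit/tools/graph_helper.py | is_it_a_partition
-- ===== SOURCE A (Python) =====
-- import itertools
--
-- def is_it_a_partition(all_nodes, partitions):
--     """ test if partitions is a partition of all_nodes.
--
--     Parameters
--     ----------
--     * all_nodes : list of nodes
--     * partitions : list of list of nodes
--
--     Returns
--     -------
--     True if 'partitions' is a partitions of all_nodes, False otherwise
--     """
--
--     for nodes_subset in partitions:
--         for node in nodes_subset:
--             if node not in all_nodes:
--                 return False
--
--     for nodes_subset1, nodes_subset2 in itertools.combinations(partitions, 2):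
--         if len(set.intersection(set(nodes_subset1), set(nodes_subset2))) > 0:
--             return False
--
--     s = set()
--     for nodes_subset in partitions:
--         s = set.union(s, set(nodes_subset))
--
--     if s != set(all_nodes):
--         return False
--
--     return True
-- ===== SOURCE B (Python) =====
-- def is_it_a_partition(all_nodes, partitions):
--     """ test if partitions is a partition of all_nodes (single pass, cardinality test). """
--     union = set()
--     total = 0
--     for nodes_subset in partitions:
--         s = set(nodes_subset)
--         union |= s
--         total += len(s)
--     return union == set(all_nodes) and total == len(union)
-- ===== Notes on version B (the rewrite author's own statement) =====
-- stated objective: alternative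
-- what changed: Replaces A's three passes (membership scan, pairwise set-intersection scan over itertools.combinations, then a union fold) with a single pass that accumulates the union and the sum of deduplicated subset sizes, deciding disjointness by the cardinality identity sum(|set(p_i)|) == |union| and subsuming the membership scan in the union == set(all_nodes) test.
import Mathlib
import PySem

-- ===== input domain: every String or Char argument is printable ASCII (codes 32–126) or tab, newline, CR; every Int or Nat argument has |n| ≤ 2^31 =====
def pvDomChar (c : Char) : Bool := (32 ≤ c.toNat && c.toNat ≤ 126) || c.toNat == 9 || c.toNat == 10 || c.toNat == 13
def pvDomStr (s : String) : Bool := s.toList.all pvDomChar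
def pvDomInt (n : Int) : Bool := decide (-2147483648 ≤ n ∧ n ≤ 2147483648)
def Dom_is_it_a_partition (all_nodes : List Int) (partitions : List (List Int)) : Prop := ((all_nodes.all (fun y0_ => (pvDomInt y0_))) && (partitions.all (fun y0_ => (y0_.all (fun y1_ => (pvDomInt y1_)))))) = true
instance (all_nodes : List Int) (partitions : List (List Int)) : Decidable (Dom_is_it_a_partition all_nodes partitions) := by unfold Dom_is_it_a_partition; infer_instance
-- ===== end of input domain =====

-- B replaces A's three passes (membership scan, pairwise-intersection scan over combinations, union fold)
-- with a single pass accumulating the union and the sum of subset cardinalities (disjoint ⇔ sum of sizes = size of union).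


-- ===== PORT A =====
-- itertools.combinations(l, 2), in order
def pyCombos2 {α : Type} : List α → List (α × α)
  | [] => []
  | x :: xs => xs.map (fun y => (x, y)) ++ pyCombos2 xs

def is_it_a_partition (all_nodes : List Int) (partitions : List (List Int)) : Bool :=
  -- for nodes_subset in partitions: for node in nodes_subset: if node not in all_nodes: return False
  if partitions.any (fun nodes_subset => nodes_subset.any (fun node => !(all_nodes.contains node))) then
    false
  -- for s1, s2 in combinations(partitions, 2): if len(set(s1) & set(s2)) > 0: return False
  else if (pyCombos2 partitions).any (fun pq =>
      decide (0 < PySem.Set.len (PySem.Set.inter (PySem.Set.ofList pq.1) (PySem.Set.ofList pq.2)))) then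
    false
  else
    -- s = set(); for nodes_subset in partitions: s = s | set(nodes_subset)
    let s := partitions.foldl (fun s nodes_subset => PySem.Set.union s (PySem.Set.ofList nodes_subset)) PySem.Set.empty
    -- if s != set(all_nodes): return False; return True
    if !(PySem.Set.equal s (PySem.Set.ofList all_nodes)) then false else true

-- ===== PORT B =====
def is_it_a_partition_alt (all_nodes : List Int) (partitions : List (List Int)) : Bool :=
  -- union = set(); total = 0; for nodes_subset in partitions: s = set(nodes_subset); union |= s; total += len(s)
  let acc := partitions.foldl
    (fun (acc : PySem.Set Int × Int) nodes_subset =>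
      (PySem.Set.union acc.1 (PySem.Set.ofList nodes_subset),
       acc.2 + PySem.Set.len (PySem.Set.ofList nodes_subset)))
    (PySem.Set.empty, 0)
  -- return union == set(all_nodes) and total == len(union)
  PySem.Set.equal acc.1 (PySem.Set.ofList all_nodes) && (acc.2 == PySem.Set.len acc.1)

-- ===== PRECONDITION & SPEC =====
def Spec_is_it_a_partition (all_nodes : List Int) (partitions : List (List Int)) (out : Bool) : Prop := out = is_it_a_partition_alt all_nodes partitions
instance (all_nodes : List Int) (partitions : List (List Int)) (out : Bool) : Decidable (Spec_is_it_a_partition all_nodes partitions out) := by unfold Spec_is_it_a_partition; infer_instance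

-- ===== CLAIM (what is proved, stated in full; the proofs are below) =====
def Claim_equal_is_it_a_partition : Prop := ∀ (all_nodes : List Int) (partitions : List (List Int)), Dom_is_it_a_partition all_nodes partitions → Spec_is_it_a_partition all_nodes partitions (is_it_a_partition all_nodes partitions)

-- ===== LEMMAS AND PROOFS =====

-- the union accumulator both ports fold
def stepU (s : PySem.Set Int) (p : List Int) : PySem.Set Int := PySem.Set.union s (PySem.Set.ofList p)

lemma mem_foldU (ps : List (List Int)) (acc : PySem.Set Int) (x : Int) :
    x ∈ ps.foldl stepU acc ↔ x ∈ acc ∨ ∃ p ∈ ps, x ∈ p := by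
  induction ps generalizing acc with
  | nil => simp
  | cons p ps ih =>
    simp only [List.foldl_cons, ih, stepU, PySem.Set.union, PySem.Set.mem_update,
      PySem.Set.mem_ofList, List.mem_cons]
    constructor
    · rintro (((h|h)|⟨q,hq,hx⟩)) <;> first
      | exact Or.inl h
      | exact Or.inr ⟨p, Or.inl rfl, h⟩
      | exact Or.inr ⟨q, Or.inr hq, hx⟩
    · rintro (h|⟨q,(rfl|hq),hx⟩)
      · exact Or.inl (Or.inl h)
      · exact Or.inl (Or.inr hx)
      · exact Or.inr ⟨q, hq, hx⟩

-- sum of the (deduplicated) subset sizes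
def sumT (ps : List (List Int)) : Nat := (ps.map (fun p => (PySem.Set.ofList p).length)).sum

lemma len_stepU (acc : PySem.Set Int) (p : List Int) :
    (stepU acc p).length
      = acc.length + ((PySem.Set.ofList p).filter (fun y => !acc.contains y)).length := by
  simp [stepU, PySem.Set.union, PySem.Set.update_eq_append_filter]

lemma len_stepU_le (acc : PySem.Set Int) (p : List Int) :
    (stepU acc p).length ≤ acc.length + (PySem.Set.ofList p).length := by
  have := List.length_filter_le (fun y => !acc.contains y) (PySem.Set.ofList p)
  rw [len_stepU]; omega

lemma len_stepU_eq_iff (acc : PySem.Set Int) (p : List Int) :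
    (stepU acc p).length = acc.length + (PySem.Set.ofList p).length ↔ ∀ x ∈ p, x ∉ acc := by
  rw [len_stepU, Nat.add_left_cancel_iff, List.length_filter_eq_length_iff]
  constructor
  · intro h x hx hmem
    have := h x (by simpa [PySem.Set.mem_ofList] using hx)
    simp [hmem] at this
  · intro h x hx
    have : x ∉ acc := h x (by simpa [PySem.Set.mem_ofList] using hx)
    simp [this]

lemma foldU_le (ps : List (List Int)) (acc : PySem.Set Int) :
    (ps.foldl stepU acc).length ≤ acc.length + sumT ps := by
  induction ps generalizing acc with
  | nil => simp [sumT]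
  | cons p ps ih =>
    have h1 := ih (stepU acc p)
    have h2 := len_stepU_le acc p
    simp only [List.foldl_cons, sumT, List.map_cons, List.sum_cons] at *
    omega

-- cardinality test: the fold reaches the full size-sum iff the subsets avoid acc and are pairwise disjoint
lemma key (ps : List (List Int)) (acc : PySem.Set Int) :
    (ps.foldl stepU acc).length = acc.length + sumT ps
      ↔ (∀ p ∈ ps, ∀ x ∈ p, x ∉ acc) ∧ List.Pairwise (fun p q => ∀ x ∈ p, x ∉ q) ps := by
  induction ps generalizing acc with
  | nil => simp [sumT]
  | cons p ps ih =>
    have hle := foldU_le ps (stepU acc p)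
    have hstep := len_stepU_le acc p
    have hiff := len_stepU_eq_iff acc p
    have ihs := ih (stepU acc p)
    simp only [List.foldl_cons, sumT, List.map_cons, List.sum_cons, List.pairwise_cons,
      List.mem_cons, forall_eq_or_imp] at *
    constructor
    · intro h
      have h1 : (stepU acc p).length = acc.length + (PySem.Set.ofList p).length := by omega
      have h2 : (ps.foldl stepU (stepU acc p)).length = (stepU acc p).length + sumT ps := by
        simp only [sumT]; omega
      have hp := hiff.mp h1
      have ⟨ha, hb⟩ := ihs.mp (by simpa [sumT] using h2)
      have hmem : ∀ x, x ∈ stepU acc p ↔ x ∈ acc ∨ x ∈ p := by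
        intro x; simp [stepU, PySem.Set.union, PySem.Set.mem_update, PySem.Set.mem_ofList]
      refine ⟨⟨hp, fun q hq x hx => fun hc => ha q hq x hx ((hmem x).mpr (Or.inl hc))⟩,
        ⟨fun q hq x hx hc => ha q hq x hc ((hmem x).mpr (Or.inr hx)), hb⟩⟩
    · rintro ⟨⟨hp, ha⟩, hpair, hb⟩
      have hmem : ∀ x, x ∈ stepU acc p ↔ x ∈ acc ∨ x ∈ p := by
        intro x; simp [stepU, PySem.Set.union, PySem.Set.mem_update, PySem.Set.mem_ofList]
      have h1 : (stepU acc p).length = acc.length + (PySem.Set.ofList p).length := hiff.mpr hp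
      have h2 : (ps.foldl stepU (stepU acc p)).length = (stepU acc p).length + sumT ps := by
        apply ihs.mpr
        refine ⟨fun q hq x hx hc => ?_, hb⟩
        rcases (hmem x).mp hc with h | h
        · exact ha q hq x hx h
        · exact hpair q hq x h hx
      simp only [sumT] at h2; omega

-- combinations(l,2) ⇔ Pairwise
lemma combos2_iff {α : Type} (R : α → α → Prop) (l : List α) :
    (∀ pq ∈ pyCombos2 l, R pq.1 pq.2) ↔ List.Pairwise R l := by
  induction l with
  | nil => simp [pyCombos2]
  | cons x xs ih =>
    simp only [pyCombos2, List.mem_append, List.mem_map, List.pairwise_cons, ← ih]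
    constructor
    · intro h
      exact ⟨fun y hy => h (x, y) (Or.inl ⟨y, hy, rfl⟩),
        fun pq hpq => h pq (Or.inr hpq)⟩
    · rintro ⟨h1, h2⟩ pq (⟨y, hy, rfl⟩ | hpq)
      · exact h1 y hy
      · exact h2 pq hpq

lemma inter_pos_iff (p q : List Int) :
    (0 < PySem.Set.len (PySem.Set.inter (PySem.Set.ofList p) (PySem.Set.ofList q))) ↔
      ∃ x ∈ p, x ∈ q := by
  simp [PySem.Set.len, PySem.Set.inter, List.length_pos_iff_exists_mem, List.mem_filter,
    PySem.Set.mem_ofList]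

-- characterization of A
lemma A_char (all_nodes : List Int) (partitions : List (List Int)) :
    is_it_a_partition all_nodes partitions = true ↔
      (∀ p ∈ partitions, ∀ x ∈ p, x ∈ all_nodes)
      ∧ List.Pairwise (fun p q => ∀ x ∈ p, x ∉ q) partitions
      ∧ (∀ x, x ∈ partitions.foldl stepU PySem.Set.empty ↔ x ∈ all_nodes) := by
  have hfold : (fun (s : PySem.Set Int) (nodes_subset : List Int) =>
      PySem.Set.union s (PySem.Set.ofList nodes_subset)) = stepU := rfl
  have hmo : ∀ x : Int, x ∈ PySem.Set.ofList all_nodes ↔ x ∈ all_nodes := fun x => by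
    simp [PySem.Set.mem_ofList]
  simp only [is_it_a_partition, hfold]
  split_ifs with h1 h2 h3
  · simp only [List.any_eq_true, Bool.not_eq_true', ← Bool.not_eq_true,
      List.contains_eq_mem, decide_eq_true_eq] at h1
    obtain ⟨p, hp, x, hx, hnx⟩ := h1
    simp only [false_iff]
    rintro ⟨hC1, -, -⟩
    exact hnx (hC1 p hp x hx)
  · simp only [List.any_eq_true, decide_eq_true_eq] at h2
    obtain ⟨pq, hpq, hpos⟩ := h2
    obtain ⟨x, hx1, hx2⟩ := (inter_pos_iff pq.1 pq.2).mp hpos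
    simp only [false_iff]
    rintro ⟨-, hC2, -⟩
    exact ((combos2_iff _ partitions).mpr hC2) pq hpq x hx1 hx2
  · simp only [false_iff]
    rintro ⟨-, -, hC3⟩
    rw [(PySem.Set.equal_iff _ _).mpr (fun x => (hC3 x).trans (hmo x).symm)] at h3
    simp at h3
  · simp only [List.any_eq_true, Bool.not_eq_true', ← Bool.not_eq_true,
      List.contains_eq_mem, decide_eq_true_eq, not_exists, not_and, not_not] at h1
    simp only [List.any_eq_true, decide_eq_true_eq, not_exists, not_and] at h2
    simp only [Bool.not_eq_true', Bool.not_eq_false] at h3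
    have hC3 := (PySem.Set.equal_iff _ _).mp h3
    simp only [true_iff]
    refine ⟨fun p hp x hx => h1 p hp x hx, ?_, fun x => (hC3 x).trans (hmo x)⟩
    apply (combos2_iff _ partitions).mp
    intro pq hpq x hx1 hx2
    exact h2 pq hpq ((inter_pos_iff pq.1 pq.2).mpr ⟨x, hx1, hx2⟩)

-- characterization of B
lemma B_char (all_nodes : List Int) (partitions : List (List Int)) :
    is_it_a_partition_alt all_nodes partitions = true ↔
      (∀ x, x ∈ partitions.foldl stepU PySem.Set.empty ↔ x ∈ all_nodes)
      ∧ (partitions.foldl stepU PySem.Set.empty).length = sumT partitions := by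
  have hsplit : List.foldl
      (fun (acc : PySem.Set Int × Int) nodes_subset =>
        (PySem.Set.union acc.1 (PySem.Set.ofList nodes_subset),
         acc.2 + PySem.Set.len (PySem.Set.ofList nodes_subset)))
      (PySem.Set.empty, 0) partitions
      = (List.foldl stepU PySem.Set.empty partitions,
         List.foldl (fun t sub => t + PySem.Set.len (PySem.Set.ofList sub)) 0 partitions) :=
    PySem.List.foldl_prod_mk stepU (fun t sub => t + PySem.Set.len (PySem.Set.ofList sub))
      partitions PySem.Set.empty 0
  have hsum : (partitions.map (fun sub => ((PySem.Set.ofList sub).length : Int))).sum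
      = (sumT partitions : Int) := by
    simp [sumT, Nat.cast_list_sum, List.map_map, Function.comp_def]
  have hmo : ∀ x : Int, x ∈ PySem.Set.ofList all_nodes ↔ x ∈ all_nodes := fun x => by
    simp [PySem.Set.mem_ofList]
  simp only [is_it_a_partition_alt]
  rw [hsplit]
  simp only [Bool.and_eq_true, beq_iff_eq, PySem.Set.equal_iff, PySem.List.foldl_add, zero_add,
    PySem.Set.len]
  constructor
  · rintro ⟨hq, h2⟩
    rw [hsum] at h2
    exact ⟨fun x => (hq x).trans (hmo x), by exact_mod_cast h2.symm⟩
  · rintro ⟨hq, h2⟩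
    rw [hsum]
    exact ⟨fun x => (hq x).trans (hmo x).symm, by exact_mod_cast h2.symm⟩

-- ===== VERDICT (by name: the statement is the Claim_ definition above) =====
theorem is_it_a_partition_spec : Claim_equal_is_it_a_partition := by
  intro all_nodes partitions _
  unfold Spec_is_it_a_partition
  rw [Bool.eq_iff_iff, A_char, B_char]
  have hkey := key partitions PySem.Set.empty
  simp only [PySem.Set.empty, List.length_nil, Nat.zero_add, List.not_mem_nil,
    not_false_iff, implies_true, true_and] at hkey
  constructor
  · rintro ⟨_, hpair, hmem⟩
    exact ⟨hmem, hkey.mpr hpair⟩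
  · rintro ⟨hmem, hlen⟩
    refine ⟨fun p hp x hx => (hmem x).mp ((mem_foldU _ _ x).mpr (Or.inr ⟨p, hp, hx⟩)),
      hkey.mp hlen, hmem⟩
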